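-- pv_equiv track=rewrite | github.com/hominot/metric_learning | util/distribution.py | factor_expansion
-- ===== SOURCE A (Python) =====
-- from itertools import product
-- from functools import reduce
--
-- def factor_expansion(exponents):
--     ret = []
--     for expanded in product(*[[0, exponent] for exponent in exponents]):
--         ret.append(sum(expanded))
--     signs = []
--     for expanded in product(*[[1, -1] for _ in exponents]):
--         signs.append(reduce(lambda x, y: x * y, expanded))
--     return ret, signs
-- ===== SOURCE B (Python) =====
-- def factor_expansion(exponents):
--     sums = [0]
--     signs = [1]
--     for e in exponents:
--         sums = [v for s in sums for v in (s, s + e)]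
--         signs = [v for s in signs for v in (s, -s)]
--     return sums, signs
-- ===== Notes on version B (the rewrite author's own statement) =====
-- stated objective: faster
-- what changed: B replaces the two itertools.product passes with per-entry sum()/reduce() by a single incremental doubling loop that extends all subset sums and signs in place, preserving product order; intended as faster (O(2^n) vs O(n*2^n)), measured 5.9x at n=16, the largest size either finishes since the output itself has 2^n entries.
import Mathlib
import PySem

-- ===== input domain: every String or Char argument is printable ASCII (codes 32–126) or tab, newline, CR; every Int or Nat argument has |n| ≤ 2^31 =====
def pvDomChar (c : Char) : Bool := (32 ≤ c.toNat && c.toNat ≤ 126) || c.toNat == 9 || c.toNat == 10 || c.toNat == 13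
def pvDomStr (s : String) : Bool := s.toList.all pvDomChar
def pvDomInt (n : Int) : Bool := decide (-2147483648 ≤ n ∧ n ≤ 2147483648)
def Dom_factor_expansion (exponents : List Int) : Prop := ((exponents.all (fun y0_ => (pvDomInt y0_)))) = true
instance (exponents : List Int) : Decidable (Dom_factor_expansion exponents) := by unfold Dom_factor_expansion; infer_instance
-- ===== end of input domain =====

-- B replaces A's two itertools.product passes (with per-tuple sum/reduce) by one
-- incremental doubling loop over the exponents; intended as faster (measured 5.9x at n=16).


-- ===== PORT A =====
-- itertools.product(*lists) in Python's order: first coordinate varies slowest.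
def pyProduct : List (List Int) → List (List Int)
  | [] => [[]]
  | l :: ls => l.flatMap (fun x => (pyProduct ls).map (fun t => x :: t))

-- functools.reduce(mul, l) with no initial value; [] is the TypeError case
-- (excluded by Pre_), where the port returns a junk 0.
def pyReduceMul : List Int → Int
  | [] => 0
  | x :: xs => xs.foldl (· * ·) x

def factor_expansion (exponents : List Int) : List Int × List Int :=
  let ret := (pyProduct (exponents.map (fun e => [0, e]))).map (fun t => t.foldl (· + ·) 0)
  let signs := (pyProduct (exponents.map (fun _ => [1, -1]))).map pyReduceMul
  (ret, signs)

-- ===== PORT B =====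
def factor_expansion_alt (exponents : List Int) : List Int × List Int :=
  let sums := exponents.foldl (fun acc e => acc.flatMap (fun s => [s, s + e])) [0]
  let signs := exponents.foldl (fun acc _ => acc.flatMap (fun s => [s, -s])) [1]
  (sums, signs)

-- ===== PRECONDITION & SPEC =====
-- On the empty list A's reduce() raises TypeError; Pre_ excludes exactly that input.
def Pre_factor_expansion (exponents : List Int) : Prop := exponents ≠ []
instance (exponents : List Int) : Decidable (Pre_factor_expansion exponents) := by unfold Pre_factor_expansion; infer_instance
def pvWitness_factor_expansion : List Int := [2, 3]

def Spec_factor_expansion (exponents : List Int) (out : List Int × List Int) : Prop := out = factor_expansion_alt exponents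
instance (exponents : List Int) (out : List Int × List Int) : Decidable (Spec_factor_expansion exponents out) := by unfold Spec_factor_expansion; infer_instance

-- ===== CLAIM (what is proved, stated in full; the proofs are below) =====
def Claim_equal_factor_expansion : Prop := ∀ (exponents : List Int), Dom_factor_expansion exponents → Pre_factor_expansion exponents → Spec_factor_expansion exponents (factor_expansion exponents)

-- ===== LEMMAS AND PROOFS =====

-- B's doubling loop for sums, started from any seed list, equals folding each
-- product tuple of A onto each seed.
theorem foldl_sums_eq (es : List Int) : ∀ (acc : List Int),
    es.foldl (fun acc e => acc.flatMap (fun s => [s, s + e])) acc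
      = acc.flatMap (fun s => (pyProduct (es.map (fun e => [0, e]))).map (fun t => t.foldl (· + ·) s)) := by
  induction es with
  | nil => intro acc; simp [pyProduct]
  | cons e es ih =>
      intro acc
      rw [List.foldl_cons, ih, List.flatMap_assoc]
      congr 1
      funext s
      simp [pyProduct, Function.comp_def]

theorem foldl_signs_eq (es : List Int) : ∀ (acc : List Int),
    es.foldl (fun acc _ => acc.flatMap (fun s => [s, -s])) acc
      = acc.flatMap (fun s => (pyProduct (es.map (fun _ => [1, -1]))).map (fun t => t.foldl (· * ·) s)) := by
  induction es with
  | nil => intro acc; simp [pyProduct]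
  | cons e es ih =>
      intro acc
      rw [List.foldl_cons, ih, List.flatMap_assoc]
      congr 1
      funext s
      simp [pyProduct, Function.comp_def]

-- ===== VERDICT (by name: the statement is the Claim_ definition above) =====
theorem factor_expansion_spec : Claim_equal_factor_expansion := by
  intro exponents _ hpre
  unfold Spec_factor_expansion factor_expansion factor_expansion_alt
  refine Prod.ext ?_ ?_
  · simp [foldl_sums_eq]
  · simp only [foldl_signs_eq]
    cases exponents with
    | nil => exact absurd rfl hpre
    | cons e es =>
        simp only [List.flatMap_cons, List.flatMap_nil, List.append_nil]
        refine (List.map_congr_left ?_).symm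
        intro t ht
        simp only [pyProduct, List.map_cons, List.mem_flatMap, List.mem_map] at ht
        obtain ⟨x, _, t', _, rfl⟩ := ht
        simp [pyReduceMul, List.foldl_cons]
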